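-- pv_equiv track=rewrite | github.com/alejandrogomeznvs/wc2026-prediction | dashboard.py | _downstream_win_keys
-- ===== SOURCE A (Python) =====
-- def _downstream_win_keys(match_key):
--     """Keys that must be cleared when match_key's winner changes."""
--     for rnd in ("r32", "r16", "qf", "sf"):
--         if rnd in match_key:
--             ns = match_key[: match_key.index(rnd)]  # "" or "bk_"
--             tail = match_key[match_key.index(rnd):]  # "r32_0" etc.
--             break
--     else:
--         return []
--     try:
--         idx = int(tail.split("_")[1])
--     except (IndexError, ValueError):
--         idx = 0
--     p = f"win_{ns}"
--     if rnd == "r32":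
--         r16i = idx // 2
--         return [f"{p}r16_{r16i}", f"{p}qf_{r16i//2}", f"{p}sf_{r16i//4}", f"{p}final_0"]
--     if rnd == "r16":
--         qfi = idx // 2
--         return [f"{p}qf_{qfi}", f"{p}sf_{qfi//2}", f"{p}final_0"]
--     if rnd == "qf":
--         return [f"{p}sf_{idx//2}", f"{p}final_0"]
--     return [f"{p}final_0"]  # sf
-- ===== SOURCE B (Python) =====
-- def _downstream_win_keys(match_key):
--     """Keys that must be cleared when match_key's winner changes."""
--     rounds = ("r32", "r16", "qf", "sf", "final")
--     for pos, rnd in enumerate(rounds[:4]):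
--         if rnd in match_key:
--             ns = match_key[: match_key.index(rnd)]  # "" or "bk_"
--             tail = match_key[match_key.index(rnd):]  # "r32_0" etc.
--             break
--     else:
--         return []
--     try:
--         cur = int(tail.split("_")[1])
--     except (IndexError, ValueError):
--         cur = 0
--     p = f"win_{ns}"
--     keys = []
--     for r in rounds[pos + 1:]:
--         if r == "final":
--             keys.append(f"{p}final_0")
--         else:
--             cur //= 2
--             keys.append(f"{p}{r}_{cur}")
--     return keys
-- ===== Notes on version B (the rewrite author's own statement) =====
-- stated objective: simpler
-- what changed: A's four unrolled round-specific return branches (with precomputed halved indices) are replaced by a single accumulating loop over the ordered round chain ['r32','r16','qf','sf','final'] that halves a running index before each non-final round; the round detection and tail-index parsing are kept.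
import Mathlib
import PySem

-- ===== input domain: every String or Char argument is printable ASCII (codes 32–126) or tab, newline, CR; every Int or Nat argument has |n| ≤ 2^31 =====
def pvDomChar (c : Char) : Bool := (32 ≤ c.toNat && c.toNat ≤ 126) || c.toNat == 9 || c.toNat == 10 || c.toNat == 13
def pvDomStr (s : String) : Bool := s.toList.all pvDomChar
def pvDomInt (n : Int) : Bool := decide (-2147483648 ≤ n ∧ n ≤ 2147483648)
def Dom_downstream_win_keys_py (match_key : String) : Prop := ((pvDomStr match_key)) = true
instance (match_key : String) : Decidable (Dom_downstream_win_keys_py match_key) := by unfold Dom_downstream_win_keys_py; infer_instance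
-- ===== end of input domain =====

-- B replaces A's four unrolled return branches by one accumulating loop over the ordered round
-- chain (objective: simpler / different decomposition); the round detection and index parsing are kept.

-- ===== PORT A =====

-- idx = int(tail.split("_")[1]) with IndexError/ValueError caught → 0 (shared by both Pythons verbatim)
def pvParseIdx (tail : String) : Int :=
  match (PySem.Str.split? tail "_").bind (fun ps => PySem.List.pyGet? ps 1) with
  | none => 0                               -- IndexError
  | some s =>
    match PySem.Int.ofStr? s with
    | none => 0                             -- ValueError
    | some n => n

def downstream_win_keys_py (match_key : String) : List String :=
  -- for rnd in ("r32","r16","qf","sf"): if rnd in match_key: …; break / else: return []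
  match ["r32", "r16", "qf", "sf"].findSome?
      (fun rnd => if PySem.Str.isIn rnd match_key then some rnd else none) with
  | none => []
  | some rnd =>
    let i := PySem.Str.find match_key rnd          -- match_key.index(rnd): rnd is in match_key, so find = index
    let ns := PySem.Str.slice match_key none (some i)
    let tail := PySem.Str.slice match_key (some i) none
    let idx := pvParseIdx tail
    let p := "win_" ++ ns
    if rnd == "r32" then
      let r16i := PySem.Int.floordiv idx 2
      [p ++ "r16_" ++ PySem.Int.toStr r16i,
       p ++ "qf_" ++ PySem.Int.toStr (PySem.Int.floordiv r16i 2),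
       p ++ "sf_" ++ PySem.Int.toStr (PySem.Int.floordiv r16i 4),
       p ++ "final_0"]
    else if rnd == "r16" then
      let qfi := PySem.Int.floordiv idx 2
      [p ++ "qf_" ++ PySem.Int.toStr qfi,
       p ++ "sf_" ++ PySem.Int.toStr (PySem.Int.floordiv qfi 2),
       p ++ "final_0"]
    else if rnd == "qf" then
      [p ++ "sf_" ++ PySem.Int.toStr (PySem.Int.floordiv idx 2),
       p ++ "final_0"]
    else
      [p ++ "final_0"]  -- sf

-- ===== PORT B =====

def pvRounds : List String := ["r32", "r16", "qf", "sf", "final"]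

def downstream_win_keys_py_alt (match_key : String) : List String :=
  -- for pos, rnd in enumerate(rounds[:4]): if rnd in match_key: …; break / else: return []
  match (PySem.List.enumerate (PySem.List.slice pvRounds none (some 4))).findSome?
      (fun pr => if PySem.Str.isIn pr.2 match_key then some pr else none) with
  | none => []
  | some (pos, rnd) =>
    let i := PySem.Str.find match_key rnd
    let ns := PySem.Str.slice match_key none (some i)
    let tail := PySem.Str.slice match_key (some i) none
    let cur := pvParseIdx tail
    let p := "win_" ++ ns
    -- keys = []; for r in rounds[pos+1:]: final → append p+"final_0"; else cur //= 2; append p+r+"_"+cur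
    (PySem.List.slice pvRounds (some (pos + 1)) none).foldl
      (fun st r =>
        if r == "final" then (st.1 ++ [p ++ "final_0"], st.2)
        else
          let cur := PySem.Int.floordiv st.2 2
          (st.1 ++ [p ++ r ++ "_" ++ PySem.Int.toStr cur], cur))
      (([] : List String), cur)
    |>.1

-- ===== PRECONDITION & SPEC =====
def Spec_downstream_win_keys_py (match_key : String) (out : List String) : Prop := out = downstream_win_keys_py_alt match_key
instance (match_key : String) (out : List String) : Decidable (Spec_downstream_win_keys_py match_key out) := by unfold Spec_downstream_win_keys_py; infer_instance

-- ===== CLAIM (what is proved, stated in full; the proofs are below) =====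
def Claim_equal_downstream_win_keys_py : Prop := ∀ (match_key : String), Dom_downstream_win_keys_py match_key → Spec_downstream_win_keys_py match_key (downstream_win_keys_py match_key)

-- ===== LEMMAS AND PROOFS =====

theorem pvd1 (a : Int) : a/2/2 = a/4 := by omega
theorem pvd2 (a : Int) : a/2/4 = a/8 := by omega
theorem pvd3 (a : Int) : a/4/2 = a/8 := by omega
theorem pvs1 (t : String) : "r16" ++ ("_" ++ t) = "r16_" ++ t := by rw [← String.append_assoc]; rfl
theorem pvs2 (t : String) : "qf" ++ ("_" ++ t) = "qf_" ++ t := by rw [← String.append_assoc]; rfl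
theorem pvs3 (t : String) : "sf" ++ ("_" ++ t) = "sf_" ++ t := by rw [← String.append_assoc]; rfl

theorem pv_main (match_key : String) :
    downstream_win_keys_py match_key = downstream_win_keys_py_alt match_key := by
  unfold downstream_win_keys_py downstream_win_keys_py_alt pvRounds
  by_cases h1 : PySem.Str.isIn "r32" match_key = true <;>
  by_cases h2 : PySem.Str.isIn "r16" match_key = true <;>
  by_cases h3 : PySem.Str.isIn "qf" match_key = true <;>
  by_cases h4 : PySem.Str.isIn "sf" match_key = true <;>
  simp at h1 h2 h3 h4 <;>
  simp [h1, h2, h3, h4, pvd1, pvd2, pvd3, PySem.List.slice, PySem.List.clampIdx,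
    String.append_assoc, pvs1, pvs2, pvs3]

-- ===== VERDICT (by name: the statement is the Claim_ definition above) =====
theorem downstream_win_keys_py_spec : Claim_equal_downstream_win_keys_py := by
  intro match_key _
  exact pv_main match_key
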